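-- pv_equiv track=rewrite | github.com/hyerongii/Algorithm | Lecture/day08_0807_Stack1_2/21650_developfunc/21650.py | solution
-- ===== SOURCE A (Python) =====
-- def count_num(array, n):
--     answer =0
--     for i in array :
--         if i ==n :
--             answer+=1
--     return answer
--
-- def solution(progresses, speeds):
--     stack = []
--     answer = []
--
--     # 받은 리스트 요소의 개수
--     N = len(progresses)
--
--     # 리스트 내 돌면서 date계산하기
--     for i in range(N):
--         # 이때, 나머지가 0 이 아니면 몫보다 +1 해줘서 날짜수 확실히 해줌
--         if (100-progresses[i])%speeds[i] != 0:
--             date = ((100-progresses[i])//speeds[i])+1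
--         else:
--             date = ((100-progresses[i])//speeds[i])
--
--         # 그리고 그 date를 stack에 쌓는데,
--         # 큰 date 뒤에 작은 date가 들어오면 큰 date 값으로 변환해 쌓아줌
--         if not stack or stack[-1] < date:
--             stack.append(date)
--         elif stack[-1] >= date:
--             stack.append(stack[-1])
--
--     # 그렇게 쌓여진 스택 라스트를 검토
--     # 만약 date -> [5, 10, 1, 1, 20, 1]
--     # stack -> [5, 10, 10, 10, 20, 20]
--
--     # 그리고 answer에 세어준 값 넣어주기
--     for i in stack:
--         c = count_num(stack, i)
--         answer.append(c)
--         for _ in range(c-1):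
--             stack.remove(i)
--     # answer -> [1, 3, 2]
--
--     return answer
-- ===== SOURCE B (Python) =====
-- def solution(progresses, speeds):
--     answer = []
--     cur_max = None
--     run = 0
--     for p, s in zip(progresses, speeds):
--         q, r = divmod(100 - p, s)
--         d = q + (1 if r else 0)
--         if cur_max is None or d > cur_max:
--             if run:
--                 answer.append(run)
--             cur_max = d
--             run = 1
--         else:
--             run += 1
--     if run:
--         answer.append(run)
--     return answer
-- ===== Notes on version B (the rewrite author's own statement) =====
-- stated objective: faster
-- what changed: Replaces A's two-phase quadratic algorithm (build a running-max stack, then for each element rescan it with count_num and repeatedly list.remove) by a single pass that computes each task's day count, tracks the running maximum, and counts consecutive runs directly.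
import Mathlib
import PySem

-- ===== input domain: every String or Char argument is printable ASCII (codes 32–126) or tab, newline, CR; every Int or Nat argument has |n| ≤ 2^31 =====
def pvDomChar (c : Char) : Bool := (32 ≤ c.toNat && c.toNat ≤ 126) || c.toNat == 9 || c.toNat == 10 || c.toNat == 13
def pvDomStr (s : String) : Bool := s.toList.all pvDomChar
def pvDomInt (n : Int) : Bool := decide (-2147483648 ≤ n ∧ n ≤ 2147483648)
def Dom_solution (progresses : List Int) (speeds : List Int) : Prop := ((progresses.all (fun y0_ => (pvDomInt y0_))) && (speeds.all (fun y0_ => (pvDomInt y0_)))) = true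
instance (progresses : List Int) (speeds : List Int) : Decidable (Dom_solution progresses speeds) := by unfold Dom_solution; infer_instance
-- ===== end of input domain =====

-- B replaces A's quadratic second phase (count_num + repeated list.remove over the stack)
-- by a single pass that counts consecutive runs of the running maximum of the day counts.

-- ===== PORT A =====

-- count_num(array, n)
def countA (array : List Int) (n : Int) : Int :=
  array.foldl (fun answer i => if i = n then answer + 1 else answer) 0

-- one step of A's first loop: push date (or the larger stack[-1]) onto the stack
def pushA (stack : List Int) (date : Int) : List Int :=
  if stack = [] ∨ PySem.List.pyGetD stack (-1) 0 < date then stack ++ [date]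
  else if date ≤ PySem.List.pyGetD stack (-1) 0 then stack ++ [PySem.List.pyGetD stack (-1) 0]
  else stack  -- unreachable (Python's if/elif covers all cases); falls through unchanged

-- A's second loop: 'for i in stack' over a list mutated by stack.remove — CPython iterates
-- by an internal index, so it is an index loop; idx grows by 1 each iteration and the stack
-- never grows, so fuel = the stack's length at entry bounds the iteration count exactly.
def loopA : Nat → List Int → Nat → List Int → List Int
  | 0, _, _, answer => answer
  | fuel + 1, stack, idx, answer =>
    if h : idx < stack.length then
      let i := stack[idx]
      let c := countA stack i
      -- for _ in range(c-1): stack.remove(i)  (ValueError unreachable: i occurs in stack)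
      let stack' := (List.range (c - 1).toNat).foldl
        (fun st _ => (PySem.List.remove? st i).getD st) stack
      loopA fuel stack' (idx + 1) (answer ++ [c])
    else answer

def solution (progresses : List Int) (speeds : List Int) : List Int :=
  let N := progresses.length
  -- pyGetD's default 0 is never consulted inside Pre_solution (indices are in range there)
  let stack := (PySem.List.pyRange 0 (N : Int) 1).foldl
    (fun stack i =>
      let p := PySem.List.pyGetD progresses i 0
      let s := PySem.List.pyGetD speeds i 0
      let date := if PySem.Int.mod (100 - p) s ≠ 0
                  then PySem.Int.floordiv (100 - p) s + 1
                  else PySem.Int.floordiv (100 - p) s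
      pushA stack date) []
  loopA stack.length stack 0 []

-- ===== PORT B =====

-- one step of B's single pass: state = (answer, cur_max, run)
def stepB (st : List Int × Option Int × Int) (ps : Int × Int) : List Int × Option Int × Int :=
  let q := PySem.Int.floordiv (100 - ps.1) ps.2
  let r := PySem.Int.mod (100 - ps.1) ps.2
  let d := q + (if r ≠ 0 then 1 else 0)
  match st with
  | (answer, none, run) => ((if run ≠ 0 then answer ++ [run] else answer), some d, 1)
  | (answer, some m, run) =>
    if d > m then ((if run ≠ 0 then answer ++ [run] else answer), some d, 1)
    else (answer, some m, run + 1)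

def solution_alt (progresses : List Int) (speeds : List Int) : List Int :=
  let fin := (progresses.zip speeds).foldl stepB ([], none, 0)
  if fin.2.2 ≠ 0 then fin.1 ++ [fin.2.2] else fin.1

-- ===== PRECONDITION & SPEC =====
-- Pre_ excludes exactly the inputs where A raises: IndexError when speeds is shorter than
-- progresses, ZeroDivisionError when a used speed is 0.
def Pre_solution (progresses : List Int) (speeds : List Int) : Prop :=
  progresses.length ≤ speeds.length ∧ ∀ x ∈ speeds.take progresses.length, x ≠ 0

instance (progresses : List Int) (speeds : List Int) : Decidable (Pre_solution progresses speeds) := by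
  unfold Pre_solution; infer_instance

def pvWitness_solution : List Int × List Int := ([93, 30, 55], [1, 30, 5])

def Spec_solution (progresses : List Int) (speeds : List Int) (out : List Int) : Prop := out = solution_alt progresses speeds
instance (progresses : List Int) (speeds : List Int) (out : List Int) : Decidable (Spec_solution progresses speeds out) := by unfold Spec_solution; infer_instance

-- ===== CLAIM (what is proved, stated in full; the proofs are below) =====
def Claim_equal_solution : Prop := ∀ (progresses : List Int) (speeds : List Int), Dom_solution progresses speeds → Pre_solution progresses speeds → Spec_solution progresses speeds (solution progresses speeds)


-- ===== LEMMAS AND PROOFS =====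

-- the number of days for one task
def dte (a b : Int) : Int :=
  if PySem.Int.mod (100 - a) b ≠ 0 then PySem.Int.floordiv (100 - a) b + 1
  else PySem.Int.floordiv (100 - a) b

-- running maximum starting from m
def smax (m : Int) : List Int → List Int
  | [] => []
  | d :: t => (if m < d then d else m) :: smax (if m < d then d else m) t

-- run lengths of consecutive equal elements
def runLens : List Int → List Int
  | [] => []
  | a :: t =>
    (((t.takeWhile (fun x => x = a)).length : Int) + 1) :: runLens (t.dropWhile (fun x => x = a))
termination_by l => l.length
decreasing_by simpa using Nat.lt_succ_of_le (List.length_dropWhile_le _ _)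

theorem smax_ge : ∀ (ds : List Int) (m x : Int), x ∈ smax m ds → m ≤ x := by
  intro ds
  induction ds with
  | nil => intro m x h; simp [smax] at h
  | cons d t ih =>
    intro m x h
    simp only [smax, List.mem_cons] at h
    rcases h with h | h
    · subst h; split <;> omega
    · have := ih _ _ h; split at this <;> omega

theorem smax_pairwise : ∀ (ds : List Int) (m : Int), (smax m ds).Pairwise (· ≤ ·) := by
  intro ds
  induction ds with
  | nil => intro m; simp [smax]
  | cons d t ih =>
    intro m
    simp only [smax]
    exact List.Pairwise.cons (fun x hx => smax_ge t _ x hx) (ih _)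

theorem countA_eq : ∀ (l : List Int) (n acc : Int),
    l.foldl (fun answer i => if i = n then answer + 1 else answer) acc = acc + (l.count n : Int) := by
  intro l n
  induction l with
  | nil => intro acc; simp
  | cons x t ih =>
    intro acc
    simp only [List.foldl_cons, List.count_cons, ih]
    by_cases h : x = n <;> simp [h, beq_iff_eq] <;> push_cast <;> ring

theorem remove?_append_of_not_mem (kept l : List Int) (m : Int) (hk : m ∉ kept) :
    PySem.List.remove? (kept ++ l) m = (PySem.List.remove? l m).map (kept ++ ·) := by
  induction kept with
  | nil => simp
  | cons x t ih =>
    have hx : x ≠ m := fun h => hk (h ▸ List.mem_cons_self)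
    have ht : m ∉ t := fun h => hk (List.mem_cons_of_mem _ h)
    rw [List.cons_append, PySem.List.remove?_cons_of_ne _ hx, ih ht, Option.map_map]
    rfl

theorem removeN_spec (m : Int) (kept rest' : List Int) (hk : m ∉ kept) :
    ∀ (j c : Nat), j ≤ c →
    (List.range j).foldl (fun st _ => (PySem.List.remove? st m).getD st)
      (kept ++ List.replicate (c + 1) m ++ rest')
    = kept ++ List.replicate (c + 1 - j) m ++ rest' := by
  intro j
  induction j with
  | zero => intro c _; simp
  | succ j ih =>
    intro c hj
    rw [List.range_succ, List.foldl_append, ih c (Nat.le_of_succ_le hj)]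
    have hrep : List.replicate (c + 1 - j) m ++ rest' = m :: (List.replicate (c - j) m ++ rest') := by
      have : c + 1 - j = (c - j) + 1 := by omega
      simp [this, List.replicate_succ]
    simp only [List.foldl_cons, List.foldl_nil, List.append_assoc, hrep,
      remove?_append_of_not_mem kept _ m hk, PySem.List.remove?_cons_self, Option.map_some,
      Option.getD_some]
    have : c + 1 - (j + 1) = c - j := by omega
    rw [this]

-- decomposition of a sorted list at its head
theorem sorted_decomp (m : Int) (t : List Int) (h : (m :: t).Pairwise (· ≤ ·)) :
    m :: t = List.replicate ((t.takeWhile (fun x => x = m)).length + 1) m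
              ++ t.dropWhile (fun x => x = m)
    ∧ (∀ y ∈ t.dropWhile (fun x => x = m), m < y)
    ∧ (t.dropWhile (fun x => x = m)).Pairwise (· ≤ ·) := by
  have hmem : ∀ y ∈ t, m ≤ y := fun y hy => List.rel_of_pairwise_cons h hy
  have hdw : (t.dropWhile (fun x => x = m)).Pairwise (· ≤ ·) :=
    List.Pairwise.sublist (List.dropWhile_sublist _) h.of_cons
  have htw : t.takeWhile (fun x => x = m) = List.replicate (t.takeWhile (fun x => x = m)).length m :=
    List.eq_replicate_iff.mpr ⟨rfl, fun b hb => by simpa using List.mem_takeWhile_imp hb⟩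
  refine ⟨?_, ?_, hdw⟩
  · rw [List.replicate_succ, List.cons_append, ← htw, List.takeWhile_append_dropWhile]
  · intro y hy
    have hhead := List.head?_dropWhile_not (fun x => decide (x = m)) t
    cases hdwe : t.dropWhile (fun x => x = m) with
    | nil => simp [hdwe] at hy
    | cons y0 rest =>
      rw [hdwe] at hy hhead
      simp only [List.head?_cons, decide_eq_false_iff_not] at hhead
      have hy0t : y0 ∈ t := (List.dropWhile_sublist _).subset (hdwe ▸ List.mem_cons_self)
      have hy0 : m < y0 := lt_of_le_of_ne (hmem y0 hy0t) (Ne.symm hhead)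
      rcases List.mem_cons.mp hy with rfl | hy'
      · exact hy0
      · exact lt_of_lt_of_le hy0 (List.rel_of_pairwise_cons (hdwe ▸ hdw) hy')

-- A's second loop computes the run lengths of a sorted tail
theorem loopA_spec : ∀ (fuel : Nat) (rest kept ans : List Int),
    rest.length ≤ fuel → rest.Pairwise (· ≤ ·) → (∀ x ∈ kept, ∀ y ∈ rest, x < y) →
    loopA fuel (kept ++ rest) kept.length ans = ans ++ runLens rest := by
  intro fuel
  induction fuel with
  | zero =>
    intro rest kept ans hlen _ _
    have : rest = [] := List.eq_nil_of_length_eq_zero (Nat.le_zero.mp hlen)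
    subst this
    simp [loopA, runLens]
  | succ fuel ih =>
    intro rest kept ans hlen hsorted hlt
    cases rest with
    | nil => simp [loopA, runLens]
    | cons m t =>
      obtain ⟨hdec, hgt, hpw'⟩ := sorted_decomp m t hsorted
      set k := (t.takeWhile (fun x => x = m)).length with hk
      set rest' := t.dropWhile (fun x => x = m) with hrest'
      have hmk : m ∉ kept := fun hm => lt_irrefl m (hlt m hm m List.mem_cons_self)
      have hidx : kept.length < (kept ++ m :: t).length := by simp
      rw [loopA, dif_pos hidx]
      show loopA fuel
          ((List.range ((countA (kept ++ m :: t) ((kept ++ m :: t)[kept.length]'hidx) - 1).toNat)).foldl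
            (fun st _ => (PySem.List.remove? st ((kept ++ m :: t)[kept.length]'hidx)).getD st)
            (kept ++ m :: t))
          (kept.length + 1)
          (ans ++ [countA (kept ++ m :: t) ((kept ++ m :: t)[kept.length]'hidx)])
        = ans ++ runLens (m :: t)
      have hget : (kept ++ m :: t)[kept.length]'hidx = m := by
        rw [List.getElem_append_right (Nat.le_refl _)]
        simp
      have hcount : countA (kept ++ m :: t) m = ((k + 1 : Nat) : Int) := by
        rw [countA, countA_eq, List.count_append]
        have h1 : (kept.count m) = 0 := List.count_eq_zero.mpr (by
          intro hm; exact hmk (by simpa using hm))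
        have h2 : ((m :: t).count m) = k + 1 := by
          rw [hdec, List.count_append, List.count_replicate_self,
            List.count_eq_zero.mpr (fun hm => lt_irrefl m (hgt m hm))]
        rw [h1, h2]
        simp
      have hlenrest : (m :: t).length = k + 1 + rest'.length := by
        rw [hdec]; simp
      have hstack : kept ++ m :: t = kept ++ List.replicate (k + 1) m ++ rest' := by
        rw [hdec, List.append_assoc]
      have hrem : (List.range ((countA (kept ++ m :: t) ((kept ++ m :: t)[kept.length]'hidx) - 1).toNat)).foldl
          (fun st _ => (PySem.List.remove? st ((kept ++ m :: t)[kept.length]'hidx)).getD st)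
          (kept ++ m :: t) = (kept ++ [m]) ++ rest' := by
        rw [hget, hcount, hstack]
        have htoNat : (((k + 1 : Nat) : Int) - 1).toNat = k := by omega
        rw [htoNat, removeN_spec m kept rest' hmk k k (Nat.le_refl k)]
        simp
      rw [hrem, hget, hcount]
      have hlenkm : kept.length + 1 = (kept ++ [m]).length := by simp
      rw [hlenkm, ih rest' (kept ++ [m]) (ans ++ [((k + 1 : Nat) : Int)])
        (by omega) hpw'
        (by
          intro x hx y hy
          rcases List.mem_append.mp hx with hx' | hx'
          · exact hlt x hx' y (by rw [hdec]; exact List.mem_append_right _ hy)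
          · have : x = m := by simpa using hx'
            exact this ▸ hgt y hy)]
      have hrl : runLens (m :: t) = ((k + 1 : Nat) : Int) :: runLens rest' := by
        rw [runLens]
        norm_cast
      rw [hrl, List.append_assoc]
      rfl

-- runLens of a replicate block followed by a list not starting with m
theorem runLens_replicate_cons (c : Nat) (m : Int) (rest : List Int) (hc : 0 < c)
    (hhead : ∀ y, rest.head? = some y → y ≠ m) :
    runLens (List.replicate c m ++ rest) = (c : Int) :: runLens rest := by
  have key : ∀ k : Nat,
      (List.replicate k m ++ rest).takeWhile (fun x => x = m) = List.replicate k m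
      ∧ (List.replicate k m ++ rest).dropWhile (fun x => x = m) = rest := by
    intro k
    induction k with
    | zero =>
      cases hre : rest with
      | nil => simp
      | cons y ys =>
        have hy : y ≠ m := hhead y (by rw [hre]; rfl)
        simp [List.takeWhile_cons, List.dropWhile_cons, hy]
    | succ k ih =>
      simp [List.replicate_succ, List.takeWhile_cons, List.dropWhile_cons, ih.1, ih.2]
  obtain ⟨k, rfl⟩ : ∃ k, c = k + 1 := ⟨c - 1, by omega⟩
  rw [List.replicate_succ, List.cons_append, runLens, (key k).1, (key k).2]
  simp

-- B's fold computes the run lengths of the running maximum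
theorem bfold_spec : ∀ (ds : List Int) (m : Int) (ans : List Int) (r : Nat),
    (let fin := ds.foldl (fun st d =>
        match st with
        | (answer, none, run) => ((if run ≠ 0 then answer ++ [run] else answer), some d, (1:Int))
        | (answer, some mm, run) =>
          if d > mm then ((if run ≠ 0 then answer ++ [run] else answer), some d, 1)
          else (answer, some mm, run + 1)) (ans, some m, ((r : Int) + 1));
      if fin.2.2 ≠ 0 then fin.1 ++ [fin.2.2] else fin.1)
    = ans ++ runLens (List.replicate (r + 1) m ++ smax m ds) := by
  intro ds
  induction ds with
  | nil =>
    intro m ans r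
    show (if ((r : Int) + 1) ≠ 0 then ans ++ [(r : Int) + 1] else ans) = _
    rw [if_pos (by omega : ((r : Int) + 1) ≠ 0)]
    rw [smax, runLens_replicate_cons (r + 1) m [] (Nat.succ_pos r) (by intro y hy; simp at hy)]
    simp [runLens]
  | cons d t ih =>
    intro m ans r
    simp only [List.foldl_cons]
    by_cases hd : d > m
    · rw [if_pos hd, if_pos (by omega : ¬ ((r : Int) + 1) = 0)]
      have h2 := ih d (ans ++ [(r : Int) + 1]) 0
      have h4 : List.replicate (0 + 1) d ++ smax d t = d :: smax d t := by simp
      rw [h4] at h2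
      rw [show ((0 : Nat) : Int) + 1 = 1 by norm_num] at h2
      rw [h2]
      have h3 : smax m (d :: t) = d :: smax d t := by
        rw [smax, if_pos hd]
      rw [h3, runLens_replicate_cons (r + 1) m (d :: smax d t) (Nat.succ_pos r)
        (by intro y hy; simp at hy; omega)]
      rw [List.append_assoc]
      norm_cast
    · rw [if_neg hd]
      have h2 := ih m ans (r + 1)
      have hc : ((r + 1 : Nat) : Int) + 1 = ((r : Int) + 1) + 1 := by push_cast; ring
      rw [hc] at h2
      rw [h2]
      have h3 : smax m (d :: t) = m :: smax m t := by
        rw [smax, if_neg (by omega : ¬ m < d)]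
      rw [h3]
      have h4 : List.replicate (r + 1) m ++ m :: smax m t
          = List.replicate (r + 1 + 1) m ++ smax m t := by
        rw [List.replicate_succ' (n := r + 1)]
        simp
      rw [h4]

-- A's first loop over range(N) with indexing is a fold over the zipped lists
theorem fold_range_zip {sg : Type} (g : sg → Int → Int → sg) :
    ∀ (p s pre ps : List Int) (init : sg), pre.length = ps.length → p.length ≤ s.length →
    (PySem.List.pyRange (pre.length : Int) ((pre.length : Int) + (p.length : Int)) 1).foldl
      (fun st i => g st (PySem.List.pyGetD (pre ++ p) i 0) (PySem.List.pyGetD (ps ++ s) i 0)) init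
    = (p.zip s).foldl (fun st q => g st q.1 q.2) init := by
  intro p
  induction p with
  | nil =>
    intro s pre ps init _ _
    rw [PySem.List.pyRange_one_eq_nil (by simp)]
    simp
  | cons a p' ih =>
    intro s pre ps init hlen hle
    cases s with
    | nil => simp at hle
    | cons b s' =>
      rw [PySem.List.pyRange_one_cons (by push_cast [List.length_cons]; omega)]
      rw [List.foldl_cons, List.zip_cons_cons, List.foldl_cons]
      have hga : PySem.List.pyGetD (pre ++ a :: p') ((pre.length : Int)) 0 = a := by
        rw [PySem.List.pyGetD_natCast]
        simp [List.getD_eq_getElem?_getD, List.getElem?_append_right (Nat.le_refl _)]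
      have hgb : PySem.List.pyGetD (ps ++ b :: s') ((pre.length : Int)) 0 = b := by
        rw [hlen, PySem.List.pyGetD_natCast]
        simp [List.getD_eq_getElem?_getD, List.getElem?_append_right (Nat.le_refl _)]
      rw [hga, hgb]
      have hb1 : ((pre.length : Int)) + 1 = (((pre ++ [a]).length : Nat) : Int) := by
        simp
      have hb2 : ((pre.length : Int)) + (((a :: p').length : Nat) : Int)
          = (((pre ++ [a]).length : Nat) : Int) + ((p'.length : Nat) : Int) := by
        simp; push_cast; ring
      have hl1 : pre ++ a :: p' = (pre ++ [a]) ++ p' := by simp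
      have hl2 : ps ++ b :: s' = (ps ++ [b]) ++ s' := by simp
      rw [hb1, hb2, hl1, hl2, ih s' (pre ++ [a]) (ps ++ [b]) (g init a b)
        (by simp [hlen]) (by simpa using hle)]

-- pushing dates one by one builds the running maximum
theorem pushA_foldl : ∀ (ds : List Int) (pre : List Int) (m : Int),
    pre ≠ [] → PySem.List.pyGetD pre (-1) 0 = m →
    ds.foldl pushA pre = pre ++ smax m ds := by
  intro ds
  induction ds with
  | nil => intro pre m _ _; simp [smax]
  | cons d t ih =>
    intro pre m hne hlast
    have hstep : pushA pre d = pre ++ [if m < d then d else m] := by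
      rw [pushA]
      by_cases hmd : m < d
      · rw [if_pos (Or.inr (hlast ▸ hmd)), if_pos hmd]
      · rw [if_neg (by rw [hlast]; simp [hne, hmd]), if_pos (by rw [hlast]; omega),
          if_neg hmd, hlast]
    rw [List.foldl_cons, hstep,
      ih (pre ++ [if m < d then d else m]) (if m < d then d else m) (by simp)
        (PySem.List.pyGetD_neg_one_append_singleton _ _ _),
      smax, List.append_assoc]
    rfl

-- B's step on a pair is the generic step on its day count
theorem stepB_eq (st : List Int × Option Int × Int) (q : Int × Int) :
    stepB st q =
      (fun st d =>
        match st with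
        | (answer, none, run) => ((if run ≠ 0 then answer ++ [run] else answer), some d, (1:Int))
        | (answer, some mm, run) =>
          if d > mm then ((if run ≠ 0 then answer ++ [run] else answer), some d, 1)
          else (answer, some mm, run + 1)) st (dte q.1 q.2) := by
  obtain ⟨answer, cm, run⟩ := st
  have hd : PySem.Int.floordiv (100 - q.1) q.2
      + (if PySem.Int.mod (100 - q.1) q.2 ≠ 0 then (1:Int) else 0) = dte q.1 q.2 := by
    rw [dte]; split_ifs <;> simp
  cases cm with
  | none => simp only [stepB, hd]
  | some m => simp only [stepB, hd]

theorem solution_eq (progresses speeds : List Int) (hpre : Pre_solution progresses speeds) :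
    solution progresses speeds = solution_alt progresses speeds := by
  obtain ⟨hlen, -⟩ := hpre
  rw [solution, solution_alt]
  -- rewrite both sides as operations on the list of day counts ds
  have hzipB : (progresses.zip speeds).foldl stepB ([], none, 0)
      = ((progresses.zip speeds).map (fun q => dte q.1 q.2)).foldl
        (fun st d =>
          match st with
          | (answer, none, run) => ((if run ≠ 0 then answer ++ [run] else answer), some d, (1:Int))
          | (answer, some mm, run) =>
            if d > mm then ((if run ≠ 0 then answer ++ [run] else answer), some d, 1)
            else (answer, some mm, run + 1)) ([], none, 0) := by
    rw [List.foldl_map]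
    exact PySem.List.foldl_congr_mem _ _ _ _ (fun st q _ => stepB_eq st q)
  have hzipA : (PySem.List.pyRange 0 ((progresses.length : Nat) : Int) 1).foldl
      (fun stack i =>
        let p := PySem.List.pyGetD progresses i 0
        let s := PySem.List.pyGetD speeds i 0
        let date := if PySem.Int.mod (100 - p) s ≠ 0
                    then PySem.Int.floordiv (100 - p) s + 1
                    else PySem.Int.floordiv (100 - p) s
        pushA stack date) []
      = ((progresses.zip speeds).map (fun q => dte q.1 q.2)).foldl pushA [] := by
    have h := fold_range_zip (fun st a b => pushA st (dte a b))
      progresses speeds [] [] [] rfl hlen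
    simp only [List.nil_append, List.length_nil, Nat.cast_zero, zero_add] at h
    rw [List.foldl_map, ← h]
    apply PySem.List.foldl_congr_mem
    intro st i _
    rfl
  rw [hzipA, hzipB]
  -- now both sides depend only on ds
  generalize ((progresses.zip speeds).map (fun q => dte q.1 q.2)) = ds
  cases ds with
  | nil => simp [smax, loopA, runLens]
  | cons d t =>
    have hA : (d :: t).foldl pushA [] = d :: smax d t := by
      rw [List.foldl_cons]
      have hp : pushA [] d = [d] := by rw [pushA, if_pos (Or.inl rfl)]; rfl
      rw [hp, pushA_foldl t [d] d (by simp)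
        (by simpa using PySem.List.pyGetD_neg_one_append_singleton [] d 0)]
      rfl
    rw [hA]
    have hpw : (d :: smax d t).Pairwise (· ≤ ·) :=
      List.Pairwise.cons (fun x hx => smax_ge t d x hx) (smax_pairwise t d)
    have hloop := loopA_spec (d :: smax d t).length (d :: smax d t) [] [] (Nat.le_refl _) hpw
      (by simp)
    simp only [List.nil_append, List.length_nil] at hloop
    rw [hloop]
    have hb := bfold_spec t d [] 0
    rw [show ((0 : Nat) : Int) + 1 = 1 by norm_num] at hb
    simp only [List.nil_append, Nat.zero_add, List.replicate_one, List.singleton_append] at hb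
    rw [List.foldl_cons]
    exact hb.symm

-- ===== VERDICT (by name: the statement is the Claim_ definition above) =====
theorem solution_spec : Claim_equal_solution := by
  intro p s _ hpre
  exact solution_eq p s hpre
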